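-- pv_equiv track=rewrite | github.com/MrBrantCode/unitest_baseline | mut_generate/mist_train_cf/cf_48687/solution.py | min_sub_matrix
-- ===== SOURCE A (Python) =====
-- def min_sub_matrix(matrix, target):
--     N = len(matrix)
--     if N == 0:
--         return (0, 0, 0, 0)
--     M = len(matrix[0])
--
--     # Precompute prefix sums
--     ps = [[0 for _ in range(M+1)] for _ in range(N+1)]
--     for i in range(1, N+1):
--         for j in range(1, M+1):
--             ps[i][j] = matrix[i-1][j-1] + ps[i-1][j] + ps[i][j-1] - ps[i-1][j-1]
--
--     ans = None
--     for i1 in range(1, N+1):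
--         for j1 in range(1, M+1):
--             for i2 in range(i1, N+1):
--                 for j2 in range(j1, M+1):
--                     total = ps[i2][j2] - ps[i2][j1-1] - ps[i1-1][j2] + ps[i1-1][j1-1]
--                     if total == target:
--                         if not ans or (i2-i1+1)*(j2-j1+1) < (ans[2]-ans[0]+1)*(ans[3]-ans[1]+1):
--                             ans = (i1-1, j1-1, i2-1, j2-1)
--     return ans
-- ===== SOURCE B (Python) =====
-- def min_sub_matrix(matrix, target):
--     n = len(matrix)
--     if n == 0:
--         return None
--     m = len(matrix[0])
--     best = None  # key tuple (area, i1, j1, i2, j2), lexicographically minimal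
--     for i1 in range(n):
--         col = [0] * m
--         for i2 in range(i1, n):
--             row = matrix[i2]
--             col = [c + x for c, x in zip(col, row)]
--             for j1 in range(m):
--                 s = 0
--                 for j2 in range(j1, m):
--                     s += col[j2]
--                     if s == target:
--                         key = ((i2 - i1 + 1) * (j2 - j1 + 1), i1, j1, i2, j2)
--                         if best is None or key < best:
--                             best = key
--     if best is None:
--         return None
--     return (best[1], best[2], best[3], best[4])
-- ===== Notes on version B (the rewrite author's own statement) =====
-- stated objective: alternative
-- what changed: B drops A's global 2D prefix-sum table and instead fixes a row pair while maintaining incremental column sums and a running row-window sum, selecting the winner by an explicit lexicographic (area, i1, j1, i2, j2) key instead of A's first-found-minimal-area rule.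
-- intended difference: On the empty matrix A returns the tuple (0,0,0,0), claiming a rectangle that does not exist in an empty matrix; B returns None (no submatrix), which is the intended answer since None is A's own 'no rectangle found' result. — e.g. on min_sub_matrix([], 0): A returns some [0, 0, 0, 0], B returns none
import Mathlib
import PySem

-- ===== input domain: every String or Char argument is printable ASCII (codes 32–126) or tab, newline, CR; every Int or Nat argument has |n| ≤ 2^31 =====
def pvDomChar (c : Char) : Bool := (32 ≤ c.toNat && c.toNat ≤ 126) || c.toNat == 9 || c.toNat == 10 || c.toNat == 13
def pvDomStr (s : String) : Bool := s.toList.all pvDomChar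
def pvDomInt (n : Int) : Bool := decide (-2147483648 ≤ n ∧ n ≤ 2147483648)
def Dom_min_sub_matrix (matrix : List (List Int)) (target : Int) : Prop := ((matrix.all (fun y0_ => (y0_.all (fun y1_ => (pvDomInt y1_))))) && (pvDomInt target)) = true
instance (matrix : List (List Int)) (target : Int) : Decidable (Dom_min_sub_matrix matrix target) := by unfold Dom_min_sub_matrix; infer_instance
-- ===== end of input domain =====

-- B replaces A's global 2D prefix-sum table by row-pair fixing with incremental column sums and an
-- explicit lexicographic key; on the empty matrix A returns (0,0,0,0) and B returns None (see D_ below).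

-- ===== PORT A =====

-- 2D read `xs[i][j]`: exact for 0 ≤ i < len(xs), 0 ≤ j < len(xs[i]) — the only indices A uses inside Pre_.
def pvGet2 (xs : List (List Int)) (i j : Int) : Int :=
  (PySem.List.pyGet? ((PySem.List.pyGet? xs i).getD []) j).getD 0

-- 2D assignment `xs[i][j] = v`: exact for the in-range nonnegative indices A uses.
def pvSet2 (xs : List (List Int)) (i j : Int) (v : Int) : List (List Int) :=
  xs.set i.toNat (((PySem.List.pyGet? xs i).getD []).set j.toNat v)

def min_sub_matrix (matrix : List (List Int)) (target : Int) : Option (List Int) :=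
  let N : Int := matrix.length
  if N = 0 then some [0, 0, 0, 0]
  else
    let M : Int := ((PySem.List.pyGet? matrix 0).getD []).length
    -- ps = [[0]*(M+1) for _ in range(N+1)]
    let ps0 : List (List Int) := List.replicate (N + 1).toNat (List.replicate (M + 1).toNat (0 : Int))
    let ps : List (List Int) :=
      (PySem.List.pyRange 1 (N + 1) 1).foldl (fun ps i =>
        (PySem.List.pyRange 1 (M + 1) 1).foldl (fun ps j =>
          pvSet2 ps i j (pvGet2 matrix (i - 1) (j - 1) + pvGet2 ps (i - 1) j + pvGet2 ps i (j - 1)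
            - pvGet2 ps (i - 1) (j - 1))) ps) ps0
    let ans : Option (Int × Int × Int × Int) :=
      (PySem.List.pyRange 1 (N + 1) 1).foldl (fun ans i1 =>
        (PySem.List.pyRange 1 (M + 1) 1).foldl (fun ans j1 =>
          (PySem.List.pyRange i1 (N + 1) 1).foldl (fun ans i2 =>
            (PySem.List.pyRange j1 (M + 1) 1).foldl (fun ans j2 =>
              let total := pvGet2 ps i2 j2 - pvGet2 ps i2 (j1 - 1) - pvGet2 ps (i1 - 1) j2
                + pvGet2 ps (i1 - 1) (j1 - 1)
              if total = target then
                match ans with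
                | none => some (i1 - 1, j1 - 1, i2 - 1, j2 - 1)
                | some (a, b, c, d) =>
                  if (i2 - i1 + 1) * (j2 - j1 + 1) < (c - a + 1) * (d - b + 1) then
                    some (i1 - 1, j1 - 1, i2 - 1, j2 - 1)
                  else some (a, b, c, d)
              else ans) ans) ans) ans) none
    ans.map (fun q => [q.1, q.2.1, q.2.2.1, q.2.2.2])

-- ===== PORT B =====

-- Python tuple comparison `key < best` on the 5-tuples B builds (lexicographic).
def pvLt5 (k p : Int × Int × Int × Int × Int) : Bool :=
  if k.1 < p.1 then true else if p.1 < k.1 then false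
  else if k.2.1 < p.2.1 then true else if p.2.1 < k.2.1 then false
  else if k.2.2.1 < p.2.2.1 then true else if p.2.2.1 < k.2.2.1 then false
  else if k.2.2.2.1 < p.2.2.2.1 then true else if p.2.2.2.1 < k.2.2.2.1 then false
  else if k.2.2.2.2 < p.2.2.2.2 then true else false

def min_sub_matrix_alt (matrix : List (List Int)) (target : Int) : Option (List Int) :=
  let n : Int := matrix.length
  if n = 0 then none
  else
    let m : Int := ((PySem.List.pyGet? matrix 0).getD []).length
    let best : Option (Int × Int × Int × Int × Int) :=
      (PySem.List.pyRange 0 n 1).foldl (fun best i1 =>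
        ((PySem.List.pyRange i1 n 1).foldl
          (fun (st : List Int × Option (Int × Int × Int × Int × Int)) i2 =>
            let row := (PySem.List.pyGet? matrix i2).getD []
            let col := List.zipWith (· + ·) st.1 row        -- [c + x for c, x in zip(col, row)]
            let best :=
              (PySem.List.pyRange 0 m 1).foldl (fun best j1 =>
                ((PySem.List.pyRange j1 m 1).foldl
                  (fun (st2 : Int × Option (Int × Int × Int × Int × Int)) j2 =>
                    let s := st2.1 + (PySem.List.pyGet? col j2).getD 0
                    let best :=
                      if s = target then
                        let key := ((i2 - i1 + 1) * (j2 - j1 + 1), i1, j1, i2, j2)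
                        match st2.2 with
                        | none => some key
                        | some p => if pvLt5 key p then some key else some p
                      else st2.2
                    (s, best)) (0, best)).2) st.2
            (col, best))
          (List.replicate m.toNat (0 : Int), best)).2) none
    best.map (fun k => [k.2.1, k.2.2.1, k.2.2.2.1, k.2.2.2.2])

-- ===== PRECONDITION & SPEC =====

-- Pre_ excludes exactly the ragged matrices with a row shorter than row 0, on which A raises IndexError.
def Pre_min_sub_matrix (matrix : List (List Int)) (target : Int) : Prop :=
  ∀ row ∈ matrix, ((PySem.List.pyGet? matrix 0).getD []).length ≤ row.length

instance (matrix : List (List Int)) (target : Int) : Decidable (Pre_min_sub_matrix matrix target) := by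
  unfold Pre_min_sub_matrix; infer_instance

def pvWitness_min_sub_matrix : List (List Int) × Int := ([[1, 2], [3, 4]], 3)

-- On the empty matrix A returns the tuple (0,0,0,0), claiming a rectangle that does not exist; B
-- returns None — A's own "no rectangle found" answer — which is the intended value.
def D_min_sub_matrix (matrix : List (List Int)) (target : Int) : Prop := matrix = []

instance (matrix : List (List Int)) (target : Int) : Decidable (D_min_sub_matrix matrix target) := by
  unfold D_min_sub_matrix; infer_instance

def Spec_min_sub_matrix (matrix : List (List Int)) (target : Int) (out : Option (List Int)) : Prop :=
  ¬ D_min_sub_matrix matrix target → out = min_sub_matrix_alt matrix target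

instance (matrix : List (List Int)) (target : Int) (out : Option (List Int)) : Decidable (Spec_min_sub_matrix matrix target out) := by
  unfold Spec_min_sub_matrix; infer_instance

def pvDiffWitness_min_sub_matrix : List (List Int) × Int := ([], 0)

def pvDiffWitnessOut_min_sub_matrix : (Option (List Int)) × (Option (List Int)) :=
  (some [0, 0, 0, 0], none)

-- ===== CLAIM (what is proved, stated in full; the proofs are below) =====

def Claim_unchanged_min_sub_matrix : Prop := ∀ (matrix : List (List Int)) (target : Int), Dom_min_sub_matrix matrix target → Pre_min_sub_matrix matrix target → Spec_min_sub_matrix matrix target (min_sub_matrix matrix target)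

def Claim_changed_min_sub_matrix : Prop := Dom_min_sub_matrix (pvDiffWitness_min_sub_matrix.1) (pvDiffWitness_min_sub_matrix.2) ∧ Pre_min_sub_matrix (pvDiffWitness_min_sub_matrix.1) (pvDiffWitness_min_sub_matrix.2) ∧ D_min_sub_matrix (pvDiffWitness_min_sub_matrix.1) (pvDiffWitness_min_sub_matrix.2) ∧ min_sub_matrix (pvDiffWitness_min_sub_matrix.1) (pvDiffWitness_min_sub_matrix.2) = pvDiffWitnessOut_min_sub_matrix.1 ∧ min_sub_matrix_alt (pvDiffWitness_min_sub_matrix.1) (pvDiffWitness_min_sub_matrix.2) = pvDiffWitnessOut_min_sub_matrix.2 ∧ pvDiffWitnessOut_min_sub_matrix.1 ≠ pvDiffWitnessOut_min_sub_matrix.2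

def Claim_exact_min_sub_matrix : Prop := ∀ (matrix : List (List Int)) (target : Int), Dom_min_sub_matrix matrix target → Pre_min_sub_matrix matrix target → D_min_sub_matrix matrix target → min_sub_matrix matrix target ≠ min_sub_matrix_alt matrix target

-- ===== LEMMAS AND PROOFS =====

lemma pvLt5_iff (k p : Int × Int × Int × Int × Int) :
    pvLt5 k p = true ↔ (k.1 < p.1 ∨ (k.1 = p.1 ∧ (k.2.1 < p.2.1 ∨ (k.2.1 = p.2.1 ∧
      (k.2.2.1 < p.2.2.1 ∨ (k.2.2.1 = p.2.2.1 ∧ (k.2.2.2.1 < p.2.2.2.1 ∨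
        (k.2.2.2.1 = p.2.2.2.1 ∧ k.2.2.2.2 < p.2.2.2.2)))))))) := by
  unfold pvLt5
  split_ifs <;> simp <;> omega

def pvMinK (b : Option (Int × Int × Int × Int × Int)) (k : Int × Int × Int × Int × Int) :
    Option (Int × Int × Int × Int × Int) :=
  match b with
  | none => some k
  | some p => if pvLt5 k p then some k else some p

lemma pvLt5_conn {k p : Int × Int × Int × Int × Int}
    (h1 : pvLt5 k p = false) (h2 : pvLt5 p k = false) : k = p := by
  obtain ⟨a1, b1, c1, d1, e1⟩ := k
  obtain ⟨a2, b2, c2, d2, e2⟩ := p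
  rw [← Bool.not_eq_true] at h1 h2
  rw [pvLt5_iff] at h1 h2
  simp only [Prod.mk.injEq]
  simp at h1 h2
  omega

lemma pvLt5_asymm {k p : Int × Int × Int × Int × Int}
    (h1 : pvLt5 k p = true) : pvLt5 p k = false := by
  rw [← Bool.not_eq_true, pvLt5_iff]
  rw [pvLt5_iff] at h1
  omega

lemma pvLt5_trans {k p x : Int × Int × Int × Int × Int}
    (h1 : pvLt5 k p = true) (h2 : pvLt5 p x = true) : pvLt5 k x = true := by
  rw [pvLt5_iff] at *
  omega

def pvMin2 (x k : Int × Int × Int × Int × Int) : Int × Int × Int × Int × Int :=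
  if pvLt5 k x then k else x

lemma pvMinK_some (x k : Int × Int × Int × Int × Int) :
    pvMinK (some x) k = some (pvMin2 x k) := by
  simp only [pvMinK, pvMin2]
  split_ifs <;> rfl

lemma pvMin2_comm (k p : Int × Int × Int × Int × Int) : pvMin2 k p = pvMin2 p k := by
  rcases hkp : pvLt5 k p <;> rcases hpk : pvLt5 p k <;>
      simp [pvMin2, hkp, hpk] <;>
    first
      | rfl
      | exact pvLt5_conn hkp hpk
      | exact (pvLt5_conn hpk hkp).symm
      | exact absurd (pvLt5_asymm hkp) (by simp [hpk])
      | exact absurd (pvLt5_asymm hpk) (by simp [hkp])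

lemma pvMin2_rightassoc (x k p : Int × Int × Int × Int × Int) :
    pvMin2 (pvMin2 x k) p = pvMin2 (pvMin2 x p) k := by
  rcases hkx : pvLt5 k x <;> rcases hpx : pvLt5 p x <;>
      simp only [pvMin2, hkx, hpx, Bool.false_eq_true, if_false, if_true, ite_true, ite_false]
  · have hkp : pvLt5 k p = false := by
      rcases h : pvLt5 k p
      · rfl
      · exact absurd (pvLt5_trans h hpx) (by simp [hkx])
    simp [hkp]
  · have hpk : pvLt5 p k = false := by
      rcases h : pvLt5 p k
      · rfl
      · exact absurd (pvLt5_trans h hkx) (by simp [hpx])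
    simp [hpk]
  · rcases hkp : pvLt5 k p <;> rcases hpk : pvLt5 p k <;>
        simp [hkp, hpk] <;>
      first
        | rfl
        | exact pvLt5_conn hkp hpk
        | exact (pvLt5_conn hpk hkp).symm
        | exact absurd (pvLt5_asymm hkp) (by simp [hpk])
        | exact absurd (pvLt5_asymm hpk) (by simp [hkp])

lemma pvMinK_rightcomm (b : Option (Int × Int × Int × Int × Int)) (k p : Int × Int × Int × Int × Int) :
    pvMinK (pvMinK b k) p = pvMinK (pvMinK b p) k := by
  rcases b with _ | x
  · show pvMinK (some k) p = pvMinK (some p) k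
    rw [pvMinK_some, pvMinK_some, pvMin2_comm]
  · rw [pvMinK_some, pvMinK_some, pvMinK_some, pvMinK_some, pvMin2_rightassoc]

-- ---------- generic sum helpers ----------

lemma pvSum_split (f : Int → Int) {a b c : Int} (h1 : a ≤ b) (h2 : b ≤ c) :
    ((PySem.List.pyRange a c 1).map f).sum
      = ((PySem.List.pyRange a b 1).map f).sum + ((PySem.List.pyRange b c 1).map f).sum := by
  rw [PySem.List.pyRange_one_append a b c h1 h2, List.map_append, List.sum_append]

lemma pvSum_sub (l : List Int) (f g : Int → Int) :
    (l.map (fun x => f x - g x)).sum = (l.map f).sum - (l.map g).sum := by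
  induction l with
  | nil => simp
  | cons x t ih => simp [ih]; ring

lemma pvSum_comm (l1 l2 : List Int) (f : Int → Int → Int) :
    (l1.map (fun j => (l2.map (fun i => f i j)).sum)).sum
      = (l2.map (fun i => (l1.map (fun j => f i j)).sum)).sum := by
  induction l1 with
  | nil => simp
  | cons j t ih =>
    simp only [List.map_cons, List.sum_cons, ih]
    rw [PySem.List.sum_map_add_int]

-- ---------- the rectangle-sum vocabulary ----------

def pvEnt (mx : List (List Int)) (i j : Int) : Int := pvGet2 mx i j

def pvRowS (mx : List (List Int)) (r a b : Int) : Int :=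
  ((PySem.List.pyRange a b 1).map (fun c => pvEnt mx r c)).sum

def pvPS (mx : List (List Int)) (i j : Int) : Int :=
  ((PySem.List.pyRange 0 i 1).map (fun r => pvRowS mx r 0 j)).sum

def pvR (mx : List (List Int)) (q : Int × Int × Int × Int) : Int :=
  ((PySem.List.pyRange q.1 (q.2.2.1 + 1) 1).map (fun i => pvRowS mx i q.2.1 (q.2.2.2 + 1))).sum

lemma pvRowS_empty (mx : List (List Int)) (r a : Int) : pvRowS mx r a a = 0 := by
  simp [pvRowS, PySem.List.pyRange_one_eq_nil le_rfl]

lemma pvRowS_succ (mx : List (List Int)) (r a b : Int) (h : a ≤ b) :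
    pvRowS mx r a (b + 1) = pvRowS mx r a b + pvEnt mx r b := by
  simp [pvRowS, PySem.List.pyRange_one_succ_right h]

lemma pvPS_zero_left (mx : List (List Int)) (j : Int) : pvPS mx 0 j = 0 := by
  simp [pvPS, PySem.List.pyRange_one_eq_nil le_rfl]

lemma pvPS_zero_right (mx : List (List Int)) (i : Int) : pvPS mx i 0 = 0 := by
  apply List.sum_eq_zero
  intro x hx
  obtain ⟨r, _, hr⟩ := List.mem_map.mp hx
  rw [← hr, pvRowS_empty]

lemma pvPS_rec (mx : List (List Int)) {i j : Int} (hi : 1 ≤ i) (hj : 1 ≤ j) :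
    pvPS mx i j = pvEnt mx (i - 1) (j - 1) + pvPS mx (i - 1) j + pvPS mx i (j - 1)
      - pvPS mx (i - 1) (j - 1) := by
  have hsing : ∀ (a : Int), PySem.List.pyRange (a - 1) a 1 = [a - 1] := by
    intro a
    have := PySem.List.pyRange_one_singleton (a - 1)
    simpa using this
  have e1 : pvPS mx i j = pvPS mx (i - 1) j + pvRowS mx (i - 1) 0 j := by
    unfold pvPS
    rw [pvSum_split _ (by omega : (0:Int) ≤ i - 1) (by omega : i - 1 ≤ i), hsing i]
    simp
  have e2 : pvPS mx i (j - 1) = pvPS mx (i - 1) (j - 1) + pvRowS mx (i - 1) 0 (j - 1) := by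
    unfold pvPS
    rw [pvSum_split _ (by omega : (0:Int) ≤ i - 1) (by omega : i - 1 ≤ i), hsing i]
    simp
  have e3 : pvRowS mx (i - 1) 0 j = pvRowS mx (i - 1) 0 (j - 1) + pvEnt mx (i - 1) (j - 1) := by
    have := pvRowS_succ mx (i - 1) 0 (j - 1) (by omega)
    simpa [show j - 1 + 1 = j by ring] using this
  omega

lemma pvPS_diff (mx : List (List Int)) {p q u v : Int} (hp : 0 ≤ p) (hpq : p ≤ q)
    (hu : 0 ≤ u) (huv : u ≤ v) :
    pvPS mx q v - pvPS mx q u - pvPS mx p v + pvPS mx p u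
      = ((PySem.List.pyRange p q 1).map (fun r => pvRowS mx r u v)).sum := by
  have hv : pvPS mx q v = pvPS mx p v + ((PySem.List.pyRange p q 1).map (fun r => pvRowS mx r 0 v)).sum := by
    unfold pvPS; rw [pvSum_split _ hp hpq]
  have hu' : pvPS mx q u = pvPS mx p u + ((PySem.List.pyRange p q 1).map (fun r => pvRowS mx r 0 u)).sum := by
    unfold pvPS; rw [pvSum_split _ hp hpq]
  have hsub : ((PySem.List.pyRange p q 1).map (fun r => pvRowS mx r 0 v)).sum
      - ((PySem.List.pyRange p q 1).map (fun r => pvRowS mx r 0 u)).sum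
      = ((PySem.List.pyRange p q 1).map (fun r => pvRowS mx r u v)).sum := by
    rw [← pvSum_sub]
    refine congrArg List.sum (List.map_congr_left ?_)
    intro r hr
    have hs : pvRowS mx r 0 v = pvRowS mx r 0 u + pvRowS mx r u v := by
      unfold pvRowS
      rw [pvSum_split _ hu huv]
    omega
  omega

-- ---------- quad enumerations ----------

def pvQuadsA (n m : Int) : List (Int × Int × Int × Int) :=
  (PySem.List.pyRange 0 n 1).flatMap (fun i1 =>
    (PySem.List.pyRange 0 m 1).flatMap (fun j1 =>
      (PySem.List.pyRange i1 n 1).flatMap (fun i2 =>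
        (PySem.List.pyRange j1 m 1).map (fun j2 => (i1, j1, i2, j2)))))

def pvQuadsB (n m : Int) : List (Int × Int × Int × Int) :=
  (PySem.List.pyRange 0 n 1).flatMap (fun i1 =>
    (PySem.List.pyRange i1 n 1).flatMap (fun i2 =>
      (PySem.List.pyRange 0 m 1).flatMap (fun j1 =>
        (PySem.List.pyRange j1 m 1).map (fun j2 => (i1, j1, i2, j2)))))

lemma pvFlatMap_swap {γ : Type} (xs ys : List Int) (f : Int → Int → List γ) :
    (xs.flatMap fun a => ys.flatMap fun b => f a b).Perm
      (ys.flatMap fun b => xs.flatMap fun a => f a b) := by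
  induction xs with
  | nil => simp
  | cons x t ih =>
    simp only [List.flatMap_cons]
    refine List.Perm.trans (List.Perm.append_left _ ih) ?_
    exact List.flatMap_append_perm ys (fun b => f x b) (fun b => t.flatMap fun a => f a b)

lemma pvQuads_perm (n m : Int) : (pvQuadsA n m).Perm (pvQuadsB n m) := by
  apply List.Perm.flatMap_left
  intro i1 _
  exact pvFlatMap_swap (PySem.List.pyRange 0 m 1) (PySem.List.pyRange i1 n 1)
    (fun j1 i2 => (PySem.List.pyRange j1 m 1).map (fun j2 => (i1, j1, i2, j2)))

-- ---------- membership bounds ----------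

lemma pvMem_quadsA {n m : Int} {q : Int × Int × Int × Int} (h : q ∈ pvQuadsA n m) :
    0 ≤ q.1 ∧ q.1 ≤ q.2.2.1 ∧ q.2.2.1 < n ∧ 0 ≤ q.2.1 ∧ q.2.1 ≤ q.2.2.2 ∧ q.2.2.2 < m := by
  obtain ⟨i1, j1, i2, j2⟩ := q
  simp only [pvQuadsA, List.mem_flatMap, List.mem_map, PySem.List.mem_pyRange_one] at h
  obtain ⟨a, ha, b, hb, c, hc, d, hd, he⟩ := h
  obtain ⟨rfl, rfl, rfl, rfl⟩ := he
  simp only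
  omega

-- ---------- the lexicographic quad order and the A enumeration ----------

def pvQLtP (q p : Int × Int × Int × Int) : Prop :=
  q.1 < p.1 ∨ (q.1 = p.1 ∧ (q.2.1 < p.2.1 ∨ (q.2.1 = p.2.1 ∧
    (q.2.2.1 < p.2.2.1 ∨ (q.2.2.1 = p.2.2.1 ∧ q.2.2.2 < p.2.2.2)))))

lemma pvQLtP_asymm {q p : Int × Int × Int × Int} (h : pvQLtP q p) : ¬ pvQLtP p q := by
  obtain ⟨a, b, c, d⟩ := q
  obtain ⟨a', b', c', d'⟩ := p
  simp only [pvQLtP] at *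
  omega

lemma pvPairwise_quadsA (n m : Int) : (pvQuadsA n m).Pairwise pvQLtP := by
  unfold pvQuadsA
  rw [List.pairwise_flatMap]
  constructor
  · intro i1 _
    rw [List.pairwise_flatMap]
    constructor
    · intro j1 _
      rw [List.pairwise_flatMap]
      constructor
      · intro i2 _
        rw [List.pairwise_map]
        apply (PySem.List.pairwise_lt_pyRange_one _ _).imp
        intro a b hab
        simp [pvQLtP]
        omega
      · apply (PySem.List.pairwise_lt_pyRange_one _ _).imp
        intro a b hab x hx y hy
        simp only [List.mem_map] at hx hy
        obtain ⟨ja, _, rfl⟩ := hx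
        obtain ⟨jb, _, rfl⟩ := hy
        simp [pvQLtP]
        omega
    · apply (PySem.List.pairwise_lt_pyRange_one _ _).imp
      intro a b hab x hx y hy
      simp only [List.mem_flatMap, List.mem_map] at hx hy
      obtain ⟨ia, _, ja, _, rfl⟩ := hx
      obtain ⟨ib, _, jb, _, rfl⟩ := hy
      simp [pvQLtP]
      omega
  · apply (PySem.List.pairwise_lt_pyRange_one _ _).imp
    intro a b hab x hx y hy
    simp only [List.mem_flatMap, List.mem_map] at hx hy
    obtain ⟨ja, _, ia, _, ka, _, rfl⟩ := hx
    obtain ⟨jb, _, ib, _, kb, _, rfl⟩ := hy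
    simp [pvQLtP]
    omega

-- ---------- keys ----------

def pvArea (q : Int × Int × Int × Int) : Int := (q.2.2.1 - q.1 + 1) * (q.2.2.2 - q.2.1 + 1)

def pvKey (q : Int × Int × Int × Int) : Int × Int × Int × Int × Int := (pvArea q, q)

def pvAStep (b : Option (Int × Int × Int × Int)) (q : Int × Int × Int × Int) :
    Option (Int × Int × Int × Int) :=
  match b with
  | none => some q
  | some p => if pvArea q < pvArea p then some q else some p

lemma pvLt5_key_iff (q p : Int × Int × Int × Int) :
    pvLt5 (pvKey q) (pvKey p) = true ↔
      (pvArea q < pvArea p ∨ (pvArea q = pvArea p ∧ pvQLtP q p)) := by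
  obtain ⟨a, b, c, d⟩ := q
  obtain ⟨a', b', c', d'⟩ := p
  rw [pvLt5_iff]
  simp only [pvKey, pvQLtP]

lemma pvFoldArea_eq (l : List (Int × Int × Int × Int)) (b : Option (Int × Int × Int × Int))
    (hpw : l.Pairwise pvQLtP) (hb : ∀ p, b = some p → ∀ q ∈ l, pvQLtP p q) :
    (l.foldl pvAStep b).map pvKey = (l.map pvKey).foldl pvMinK (b.map pvKey) := by
  induction l generalizing b with
  | nil => simp
  | cons q t ih =>
    obtain ⟨hhead, htail⟩ := List.pairwise_cons.mp hpw
    rcases b with _ | p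
    · simp only [List.foldl_cons, List.map_cons, Option.map_none]
      show (t.foldl pvAStep (some q)).map pvKey = (t.map pvKey).foldl pvMinK (pvMinK none (pvKey q))
      rw [show pvMinK none (pvKey q) = (some q).map pvKey from rfl]
      refine ih (some q) htail ?_
      intro p hp q' hq'
      obtain rfl : p = q := (Option.some_inj.mp hp).symm
      exact hhead q' hq'
    · have hpq : pvQLtP p q := hb p rfl q List.mem_cons_self
      have hcond : pvLt5 (pvKey q) (pvKey p) = decide (pvArea q < pvArea p) := by
        by_cases h : pvArea q < pvArea p
        · simp only [h, decide_true]
          rw [pvLt5_key_iff]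
          exact Or.inl h
        · simp only [h, decide_false]
          rw [← Bool.not_eq_true, pvLt5_key_iff]
          rintro (h' | ⟨_, hqp⟩)
          · exact h h'
          · exact pvQLtP_asymm hpq hqp
      simp only [List.foldl_cons, List.map_cons]
      show (t.foldl pvAStep (pvAStep (some p) q)).map pvKey
        = (t.map pvKey).foldl pvMinK (pvMinK (some (pvKey p)) (pvKey q))
      have hstep : pvMinK (some (pvKey p)) (pvKey q) = (pvAStep (some p) q).map pvKey := by
        simp only [pvMinK, pvAStep, hcond]
        by_cases h : pvArea q < pvArea p <;> simp [h]
      rw [hstep]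
      apply ih
      · exact htail
      · intro x hx q' hq'
        simp only [pvAStep] at hx
        by_cases h : pvArea q < pvArea p <;> simp [h] at hx
        · subst hx
          exact hhead q' hq'
        · subst hx
          exact hb p rfl q' (List.mem_cons_of_mem _ hq')

-- ---------- the prefix-sum table of port A ----------

lemma pvGet2_eq (xs : List (List Int)) {i j : Int} (hi : 0 ≤ i) (hj : 0 ≤ j) :
    pvGet2 xs i j = ((xs[i.toNat]?.getD [])[j.toNat]?).getD 0 := by
  unfold pvGet2
  rw [PySem.List.pyGet?_of_nonneg _ hi, PySem.List.pyGet?_of_nonneg _ hj]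

lemma pvSet2_get_self (ps : List (List Int)) (i j v : Int) (hi : 0 ≤ i)
    (hilt : i.toNat < ps.length) (hj : 0 ≤ j) (hjlt : j.toNat < (ps[i.toNat]?.getD []).length) :
    pvGet2 (pvSet2 ps i j v) i j = v := by
  rw [pvGet2_eq _ hi hj]
  unfold pvSet2
  rw [PySem.List.pyGet?_of_nonneg _ hi]
  rw [List.getElem?_set_self (by simpa using hilt)]
  simp only [Option.getD_some]
  rw [List.getElem?_set_self hjlt]
  rfl

lemma pvSet2_get_ne (ps : List (List Int)) (i j v : Int) {i' j' : Int} (hi : 0 ≤ i) (hj : 0 ≤ j)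
    (hi' : 0 ≤ i') (hj' : 0 ≤ j') (hne : ¬ (i' = i ∧ j' = j)) :
    pvGet2 (pvSet2 ps i j v) i' j' = pvGet2 ps i' j' := by
  rw [pvGet2_eq _ hi' hj', pvGet2_eq _ hi' hj']
  unfold pvSet2
  rw [PySem.List.pyGet?_of_nonneg _ hi]
  by_cases hii : i' = i
  · subst hii
    have hjj : j'.toNat ≠ j.toNat := by
      intro h
      exact hne ⟨rfl, by omega⟩
    by_cases hilt : i'.toNat < ps.length
    · rw [List.getElem?_set_self hilt]
      simp only [Option.getD_some]
      rw [List.getElem?_set_ne (by omega)]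
    · rw [List.set_eq_of_length_le (by omega)]
  · rw [List.getElem?_set_ne (by omega)]

lemma pvSet2_length (ps : List (List Int)) (i j v : Int) :
    (pvSet2 ps i j v).length = ps.length := by
  simp [pvSet2]

lemma pvSet2_rows (ps : List (List Int)) (i j v : Int) (hi : 0 ≤ i)
    (hilt : i.toNat < ps.length) {L : Nat}
    (hrows : ∀ r ∈ ps, r.length = L) : ∀ r ∈ pvSet2 ps i j v, r.length = L := by
  intro r hr
  rcases List.mem_or_eq_of_mem_set hr with h | h
  · exact hrows r h
  · subst h
    rw [PySem.List.pyGet?_of_nonneg _ hi]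
    rw [List.length_set]
    have : ps[i.toNat]?.getD [] ∈ ps := by
      rw [List.getElem?_eq_getElem hilt]
      exact List.getElem_mem _
    exact hrows _ this

-- invariant for the table construction
def pvDone (mx : List (List Int)) (n m : Int) (ps : List (List Int)) (i j : Int) : Prop :=
  ps.length = (n + 1).toNat ∧ (∀ r ∈ ps, r.length = (m + 1).toNat) ∧
  ∀ i' j' : Int, 0 ≤ i' → i' ≤ n → 0 ≤ j' → j' ≤ m →
    pvGet2 ps i' j' = if i' < i ∨ (i' = i ∧ j' < j) then pvPS mx i' j' else 0

def pvCell (mx : List (List Int)) (i : Int) (ps : List (List Int)) (j : Int) : List (List Int) :=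
  pvSet2 ps i j (pvGet2 mx (i - 1) (j - 1) + pvGet2 ps (i - 1) j + pvGet2 ps i (j - 1)
    - pvGet2 ps (i - 1) (j - 1))

def pvRowStep (mx : List (List Int)) (m : Int) (ps : List (List Int)) (i : Int) : List (List Int) :=
  (PySem.List.pyRange 1 (m + 1) 1).foldl (pvCell mx i) ps

lemma pvRow_fill (mx : List (List Int)) (n m i : Int) (hi : 1 ≤ i) (hin : i ≤ n) :
    ∀ (fuel : Nat) (j₀ : Int) (ps : List (List Int)), (m + 1 - j₀).toNat = fuel → 1 ≤ j₀ →
      j₀ ≤ m + 1 → pvDone mx n m ps i j₀ →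
      pvDone mx n m ((PySem.List.pyRange j₀ (m + 1) 1).foldl (pvCell mx i) ps) i (m + 1) := by
  intro fuel
  induction fuel with
  | zero =>
    intro j₀ ps hf h1 h2 hd
    have hj : j₀ = m + 1 := by omega
    rw [PySem.List.pyRange_one_eq_nil (by omega)]
    subst hj
    exact hd
  | succ k ih =>
    intro j₀ ps hf h1 h2 hd
    have hlt : j₀ < m + 1 := by omega
    rw [PySem.List.pyRange_one_cons hlt, List.foldl_cons]
    apply ih (j₀ + 1) _ (by omega) (by omega) (by omega)
    obtain ⟨hlen, hrows, hval⟩ := hd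
    have hilt : i.toNat < ps.length := by rw [hlen]; omega
    have hrowlen : (ps[i.toNat]?.getD []).length = (m + 1).toNat := by
      rw [List.getElem?_eq_getElem hilt]
      exact hrows _ (List.getElem_mem _)
    refine ⟨?_, ?_, ?_⟩
    · rw [show pvCell mx i ps j₀ = pvSet2 ps i j₀ _ from rfl, pvSet2_length, hlen]
    · exact pvSet2_rows ps i j₀ _ (by omega) hilt hrows
    · intro i' j' hi0 hin' hj0 hjm
      have hstore : pvGet2 mx (i - 1) (j₀ - 1) + pvGet2 ps (i - 1) j₀ + pvGet2 ps i (j₀ - 1)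
          - pvGet2 ps (i - 1) (j₀ - 1) = pvPS mx i j₀ := by
        rw [hval (i - 1) j₀ (by omega) (by omega) (by omega) (by omega),
            hval i (j₀ - 1) (by omega) (by omega) (by omega) (by omega),
            hval (i - 1) (j₀ - 1) (by omega) (by omega) (by omega) (by omega),
            if_pos (by omega), if_pos (by omega), if_pos (by omega)]
        have := pvPS_rec mx (i := i) (j := j₀) (by omega) (by omega)
        simp only [pvEnt] at this
        rw [this]
      by_cases hc : i' = i ∧ j' = j₀
      · rw [hc.1, hc.2]
        rw [show pvCell mx i ps j₀ = pvSet2 ps i j₀ _ from rfl]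
        rw [pvSet2_get_self ps i j₀ _ (by omega) hilt (by omega) (by rw [hrowlen]; omega)]
        rw [if_pos (by omega)]
        exact hstore
      · rw [show pvCell mx i ps j₀ = pvSet2 ps i j₀ _ from rfl]
        rw [pvSet2_get_ne ps i j₀ _ (by omega) (by omega) hi0 hj0 hc]
        rw [hval i' j' hi0 hin' hj0 hjm]
        have hiff : (i' < i ∨ (i' = i ∧ j' < j₀ + 1)) ↔ (i' < i ∨ (i' = i ∧ j' < j₀)) := by
          constructor <;> intro h <;> omega
        simp only [hiff]

lemma pvDone_row_advance (mx : List (List Int)) (n m : Int) (ps : List (List Int)) (i : Int)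
    (hi : 0 ≤ i) (h : pvDone mx n m ps i (m + 1)) : pvDone mx n m ps (i + 1) 1 := by
  obtain ⟨hlen, hrows, hval⟩ := h
  refine ⟨hlen, hrows, ?_⟩
  intro i' j' hi0 hin' hj0 hjm
  have hold := hval i' j' hi0 hin' hj0 hjm
  by_cases h1 : i' ≤ i
  · rw [hold, if_pos (by omega), if_pos (by omega)]
  · by_cases h2 : i' = i + 1 ∧ j' = 0
    · obtain ⟨rfl, rfl⟩ := h2
      rw [hold, if_neg (by omega), if_pos (by omega)]
      exact (pvPS_zero_right mx _).symm
    · rw [hold, if_neg (by omega), if_neg (by omega)]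

lemma pvDone_init (mx : List (List Int)) (n m : Int) (hn : 0 ≤ n) (hm : 0 ≤ m) :
    pvDone mx n m (List.replicate (n + 1).toNat (List.replicate (m + 1).toNat (0 : Int))) 1 1 := by
  refine ⟨by simp, ?_, ?_⟩
  · intro r hr
    rw [List.eq_of_mem_replicate hr]
    simp
  · intro i' j' hi0 hin' hj0 hjm
    have hz : pvGet2 (List.replicate (n + 1).toNat (List.replicate (m + 1).toNat (0 : Int))) i' j' = 0 := by
      rw [pvGet2_eq _ hi0 hj0]
      rw [List.getElem?_replicate]
      by_cases h : i'.toNat < (n + 1).toNat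
      · rw [if_pos h]
        simp only [Option.getD_some]
        rw [List.getElem?_replicate]
        by_cases h2 : j'.toNat < (m + 1).toNat
        · rw [if_pos h2]
          rfl
        · rw [if_neg h2]
          rfl
      · rw [if_neg h]
        rfl
    rw [hz]
    split_ifs with hc
    · rcases hc with h | ⟨h, h2⟩
      · obtain rfl : i' = 0 := by omega
        exact (pvPS_zero_left mx _).symm
      · obtain rfl : j' = 0 := by omega
        exact (pvPS_zero_right mx _).symm
    · rfl

lemma pvTable_fill (mx : List (List Int)) (n m : Int) (hm : 0 ≤ m) :
    ∀ (fuel : Nat) (i₀ : Int) (ps : List (List Int)), (n + 1 - i₀).toNat = fuel → 1 ≤ i₀ →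
      i₀ ≤ n + 1 → pvDone mx n m ps i₀ 1 →
      pvDone mx n m ((PySem.List.pyRange i₀ (n + 1) 1).foldl (pvRowStep mx m) ps) (n + 1) 1 := by
  intro fuel
  induction fuel with
  | zero =>
    intro i₀ ps hf h1 h2 hd
    have : i₀ = n + 1 := by omega
    rw [PySem.List.pyRange_one_eq_nil (by omega)]
    subst this
    exact hd
  | succ k ih =>
    intro i₀ ps hf h1 h2 hd
    have hlt : i₀ < n + 1 := by omega
    rw [PySem.List.pyRange_one_cons hlt, List.foldl_cons]
    apply ih (i₀ + 1) _ (by omega) (by omega) (by omega)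
    apply pvDone_row_advance mx n m _ i₀ (by omega)
    exact pvRow_fill mx n m i₀ (by omega) (by omega) m.toNat 1 ps (by omega) (by omega)
      (by omega) hd

lemma pvTable_get (mx : List (List Int)) (n m : Int) (hn : 0 ≤ n) (hm : 0 ≤ m)
    {i' j' : Int} (hi0 : 0 ≤ i') (hin : i' ≤ n) (hj0 : 0 ≤ j') (hjm : j' ≤ m) :
    pvGet2 ((PySem.List.pyRange 1 (n + 1) 1).foldl (pvRowStep mx m)
        (List.replicate (n + 1).toNat (List.replicate (m + 1).toNat (0 : Int)))) i' j'
      = pvPS mx i' j' := by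
  have h := pvTable_fill mx n m hm n.toNat 1 _ (by omega) (by omega) (by omega)
    (pvDone_init mx n m hn hm)
  rw [h.2.2 i' j' hi0 hin hj0 hjm, if_pos (by omega)]

-- ---------- B-side: column arrays and window sums ----------

def pvColS (mx : List (List Int)) (i1 i2 j : Int) : Int :=
  ((PySem.List.pyRange i1 i2 1).map (fun i => pvEnt mx i j)).sum

def pvColArr (mx : List (List Int)) (m i1 i2 : Int) : List Int :=
  (List.range m.toNat).map (fun (j : Nat) => pvColS mx i1 i2 (j : Int))

def pvWin (mx : List (List Int)) (i1 i2 j1 a : Int) : Int :=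
  ((PySem.List.pyRange j1 a 1).map (fun j => pvColS mx i1 i2 j)).sum

lemma pvWin_eq_R (mx : List (List Int)) (i1 j1 i2 a : Int) :
    pvWin mx i1 (i2 + 1) j1 (a + 1) = pvR mx (i1, j1, i2, a) := by
  unfold pvWin pvR pvColS pvRowS
  exact (pvSum_comm (PySem.List.pyRange j1 (a + 1) 1) (PySem.List.pyRange i1 (i2 + 1) 1)
    (fun i j => pvEnt mx i j)).trans rfl

lemma pvColArr_init (mx : List (List Int)) (m i1 : Int) :
    pvColArr mx m i1 i1 = List.replicate m.toNat 0 := by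
  unfold pvColArr pvColS
  rw [PySem.List.pyRange_one_eq_nil le_rfl]
  have h := List.eq_replicate_of_mem (a := (0 : Int))
    (l := (List.range m.toNat).map (fun j => (List.map (fun i => pvEnt mx i (j : Int)) []).sum))
    (by intro b hb; simp at hb; obtain ⟨_, _, rfl⟩ := hb; simp)
  simpa using h

lemma pvColArr_step (mx : List (List Int)) (m i1 i2 : Int) (hi2 : 0 ≤ i2) (hi12 : i1 ≤ i2)
    (hlen : m.toNat ≤ ((PySem.List.pyGet? mx i2).getD []).length) :
    List.zipWith (· + ·) (pvColArr mx m i1 i2) ((PySem.List.pyGet? mx i2).getD [])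
      = pvColArr mx m i1 (i2 + 1) := by
  apply List.ext_getElem?
  intro k
  rw [List.getElem?_zipWith]
  unfold pvColArr
  by_cases hk : k < m.toNat
  · rw [List.getElem?_map, List.getElem?_map, List.getElem?_range hk]
    rw [List.getElem?_eq_getElem (by omega)]
    simp only [Option.map_some]
    have hcol : pvColS mx i1 i2 (k : Int) + ((PySem.List.pyGet? mx i2).getD [])[k] =
        pvColS mx i1 (i2 + 1) (k : Int) := by
      unfold pvColS
      rw [PySem.List.pyRange_one_succ_right hi12, List.map_append, List.sum_append]
      simp only [List.map_cons, List.map_nil, List.sum_cons, List.sum_nil]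
      have hent : pvEnt mx i2 (k : Int) = ((PySem.List.pyGet? mx i2).getD [])[k] := by
        unfold pvEnt pvGet2
        rw [PySem.List.pyGet?_of_nonneg _ (by omega : (0:Int) ≤ (k : Int))]
        rw [Int.toNat_natCast]
        rw [List.getElem?_eq_getElem (by omega)]
        rfl
      rw [hent]
      ring
    rw [hcol]
  · rw [List.getElem?_map, List.getElem?_map, List.getElem?_eq_none (by simp only [List.length_range]; omega)]
    simp

-- ---------- B-side: the three loop levels ----------

def pvStepJ2 (tgt : Int) (col : List Int) (i1 j1 i2 : Int)
    (st2 : Int × Option (Int × Int × Int × Int × Int)) (j2 : Int) :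
    Int × Option (Int × Int × Int × Int × Int) :=
  let s := st2.1 + (PySem.List.pyGet? col j2).getD 0
  let best :=
    if s = tgt then
      match st2.2 with
      | none => some ((i2 - i1 + 1) * (j2 - j1 + 1), i1, j1, i2, j2)
      | some p => if pvLt5 ((i2 - i1 + 1) * (j2 - j1 + 1), i1, j1, i2, j2) p
          then some ((i2 - i1 + 1) * (j2 - j1 + 1), i1, j1, i2, j2) else some p
    else st2.2
  (s, best)

lemma pvInner (mx : List (List Int)) (tgt m i1 i2 j1 : Int) (col : List Int)
    (hcol : col = pvColArr mx m i1 (i2 + 1)) (hj1 : 0 ≤ j1) :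
    ∀ (fuel : Nat) (a : Int), (m - a).toNat = fuel → j1 ≤ a → a ≤ m →
      ∀ b, ((PySem.List.pyRange a m 1).foldl (pvStepJ2 tgt col i1 j1 i2)
          (pvWin mx i1 (i2 + 1) j1 a, b)).2
        = ((((PySem.List.pyRange a m 1).map (fun j2 => (i1, j1, i2, j2))).filter
            (fun q => decide (pvR mx q = tgt))).map pvKey).foldl pvMinK b := by
  intro fuel
  induction fuel with
  | zero =>
    intro a hf h1 h2 b
    rw [PySem.List.pyRange_one_eq_nil (by omega)]
    rfl
  | succ k ih =>
    intro a hf h1 h2 b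
    have hlt : a < m := by omega
    rw [PySem.List.pyRange_one_cons hlt]
    have hget : (PySem.List.pyGet? col a).getD 0 = pvColS mx i1 (i2 + 1) a := by
      rw [hcol]
      rw [PySem.List.pyGet?_of_nonneg _ (by omega : (0:Int) ≤ a)]
      unfold pvColArr
      rw [List.getElem?_map, List.getElem?_range (by omega)]
      simp only [Option.map_some, Option.getD_some]
      rw [Int.toNat_of_nonneg (by omega)]
    have hwin : pvWin mx i1 (i2 + 1) j1 a + pvColS mx i1 (i2 + 1) a
        = pvWin mx i1 (i2 + 1) j1 (a + 1) := by
      unfold pvWin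
      rw [PySem.List.pyRange_one_succ_right h1, List.map_append, List.sum_append]
      simp
    have hstep : pvStepJ2 tgt col i1 j1 i2 (pvWin mx i1 (i2 + 1) j1 a, b) a
        = (pvWin mx i1 (i2 + 1) j1 (a + 1),
           if pvR mx (i1, j1, i2, a) = tgt then pvMinK b (pvKey (i1, j1, i2, a)) else b) := by
      simp only [pvStepJ2, hget]
      rw [hwin, pvWin_eq_R]
      refine congrArg (Prod.mk _) ?_
      by_cases hh : pvR mx (i1, j1, i2, a) = tgt
      · rw [if_pos hh, if_pos hh]
        rcases b with _ | p <;> rfl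
      · rw [if_neg hh, if_neg hh]
    rw [List.foldl_cons, hstep]
    rw [List.map_cons]
    by_cases hh : pvR mx (i1, j1, i2, a) = tgt
    · rw [if_pos hh]
      rw [List.filter_cons_of_pos (by simpa using hh), List.map_cons, List.foldl_cons]
      exact ih (a + 1) (by omega) (by omega) (by omega) (pvMinK b (pvKey (i1, j1, i2, a)))
    · rw [if_neg hh]
      rw [List.filter_cons_of_neg (by simpa using hh)]
      exact ih (a + 1) (by omega) (by omega) (by omega) b

lemma pvFilter_flatMap {α β : Type} (l : List α) (f : α → List β) (p : β → Bool) :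
    (l.flatMap f).filter p = l.flatMap (fun a => (f a).filter p) := by
  induction l with
  | nil => rfl
  | cons x t ih => simp [List.filter_append, ih]

lemma pvJ1 (mx : List (List Int)) (tgt m i1 i2 : Int) (col : List Int)
    (hcol : col = pvColArr mx m i1 (i2 + 1)) (b : Option (Int × Int × Int × Int × Int)) :
    (PySem.List.pyRange 0 m 1).foldl (fun best j1 =>
        ((PySem.List.pyRange j1 m 1).foldl (pvStepJ2 tgt col i1 j1 i2) (0, best)).2) b
      = ((((PySem.List.pyRange 0 m 1).flatMap (fun j1 =>
            (PySem.List.pyRange j1 m 1).map (fun j2 => (i1, j1, i2, j2)))).filter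
          (fun q => decide (pvR mx q = tgt))).map pvKey).foldl pvMinK b := by
  rw [pvFilter_flatMap, List.map_flatMap, List.foldl_flatMap]
  apply PySem.List.foldl_congr_mem
  intro acc j1 hj1mem
  rw [PySem.List.mem_pyRange_one] at hj1mem
  have h0 : pvWin mx i1 (i2 + 1) j1 j1 = 0 := by
    unfold pvWin
    rw [PySem.List.pyRange_one_eq_nil le_rfl]
    rfl
  have := pvInner mx tgt m i1 i2 j1 col hcol (by omega) (m - j1).toNat j1 rfl le_rfl
    (by omega) acc
  rw [h0] at this
  exact this

def pvStepI2 (mx : List (List Int)) (tgt m i1 : Int)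
    (st : List Int × Option (Int × Int × Int × Int × Int)) (i2 : Int) :
    List Int × Option (Int × Int × Int × Int × Int) :=
  let row := (PySem.List.pyGet? mx i2).getD []
  let col := List.zipWith (· + ·) st.1 row
  let best := (PySem.List.pyRange 0 m 1).foldl (fun best j1 =>
    ((PySem.List.pyRange j1 m 1).foldl (pvStepJ2 tgt col i1 j1 i2) (0, best)).2) st.2
  (col, best)

lemma pvI2 (mx : List (List Int)) (tgt n m i1 : Int) (hi1 : 0 ≤ i1)
    (hrow : ∀ i : Int, 0 ≤ i → i < n → m.toNat ≤ ((PySem.List.pyGet? mx i).getD []).length) :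
    ∀ (fuel : Nat) (a : Int), (n - a).toNat = fuel → i1 ≤ a → a ≤ n →
      ∀ b, ((PySem.List.pyRange a n 1).foldl (pvStepI2 mx tgt m i1) (pvColArr mx m i1 a, b)).2
        = ((((PySem.List.pyRange a n 1).flatMap (fun i2 =>
              (PySem.List.pyRange 0 m 1).flatMap (fun j1 =>
                (PySem.List.pyRange j1 m 1).map (fun j2 => (i1, j1, i2, j2))))).filter
            (fun q => decide (pvR mx q = tgt))).map pvKey).foldl pvMinK b := by
  intro fuel
  induction fuel with
  | zero =>
    intro a hf h1 h2 b
    rw [PySem.List.pyRange_one_eq_nil (by omega)]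
    rfl
  | succ k ih =>
    intro a hf h1 h2 b
    have hlt : a < n := by omega
    rw [PySem.List.pyRange_one_cons hlt]
    have hcolstep : List.zipWith (· + ·) (pvColArr mx m i1 a) ((PySem.List.pyGet? mx a).getD [])
        = pvColArr mx m i1 (a + 1) :=
      pvColArr_step mx m i1 a (by omega) h1 (hrow a (by omega) hlt)
    have hstep : pvStepI2 mx tgt m i1 (pvColArr mx m i1 a, b) a
        = (pvColArr mx m i1 (a + 1),
           ((((PySem.List.pyRange 0 m 1).flatMap (fun j1 =>
                (PySem.List.pyRange j1 m 1).map (fun j2 => (i1, j1, a, j2)))).filter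
              (fun q => decide (pvR mx q = tgt))).map pvKey).foldl pvMinK b) := by
      simp only [pvStepI2]
      rw [hcolstep]
      refine congrArg (Prod.mk _) ?_
      exact pvJ1 mx tgt m i1 a _ rfl b
    rw [List.foldl_cons, hstep]
    rw [List.flatMap_cons, List.filter_append, List.map_append, List.foldl_append]
    exact ih (a + 1) (by omega) (by omega) (by omega) _

-- ---------- assembling port A ----------

def pvShiftQ (q : Int × Int × Int × Int) : Int × Int × Int × Int :=
  (q.1 + 1, q.2.1 + 1, q.2.2.1 + 1, q.2.2.2 + 1)

def pvOut (k : Int × Int × Int × Int × Int) : List Int :=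
  [k.2.1, k.2.2.1, k.2.2.2.1, k.2.2.2.2]

def pvAnswer (mx : List (List Int)) (tgt : Int) (l : List (Int × Int × Int × Int)) :
    Option (List Int) :=
  (((l.filter (fun q => decide (pvR mx q = tgt))).map pvKey).foldl pvMinK none).map pvOut

def pvGA (mx : List (List Int)) (tgt : Int) (ps : List (List Int))
    (ans : Option (Int × Int × Int × Int)) (q : Int × Int × Int × Int) :
    Option (Int × Int × Int × Int) :=
  if pvGet2 ps q.2.2.1 q.2.2.2 - pvGet2 ps q.2.2.1 (q.2.1 - 1) - pvGet2 ps (q.1 - 1) q.2.2.2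
      + pvGet2 ps (q.1 - 1) (q.2.1 - 1) = tgt then
    match ans with
    | none => some (q.1 - 1, q.2.1 - 1, q.2.2.1 - 1, q.2.2.2 - 1)
    | some (a, b, c, d) =>
      if (q.2.2.1 - q.1 + 1) * (q.2.2.2 - q.2.1 + 1) < (c - a + 1) * (d - b + 1) then
        some (q.1 - 1, q.2.1 - 1, q.2.2.1 - 1, q.2.2.2 - 1)
      else some (a, b, c, d)
  else ans

lemma pvGA_mk (mx : List (List Int)) (tgt : Int) (ps : List (List Int))
    (acc : Option (Int × Int × Int × Int)) (i1 j1 i2 j2 : Int) :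
    pvGA mx tgt ps acc (i1, j1, i2, j2)
      = (if pvGet2 ps i2 j2 - pvGet2 ps i2 (j1 - 1) - pvGet2 ps (i1 - 1) j2
            + pvGet2 ps (i1 - 1) (j1 - 1) = tgt then
          match acc with
          | none => some (i1 - 1, j1 - 1, i2 - 1, j2 - 1)
          | some (a, b, c, d) =>
            if (i2 - i1 + 1) * (j2 - j1 + 1) < (c - a + 1) * (d - b + 1) then
              some (i1 - 1, j1 - 1, i2 - 1, j2 - 1)
            else some (a, b, c, d)
        else acc) := rfl

lemma pvAStep_mk (acc : Option (Int × Int × Int × Int)) (i1 j1 i2 j2 : Int) :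
    pvAStep acc (i1, j1, i2, j2)
      = (match acc with
        | none => some (i1, j1, i2, j2)
        | some (a, b, c, d) =>
          if (i2 - i1 + 1) * (j2 - j1 + 1) < (c - a + 1) * (d - b + 1) then
            some (i1, j1, i2, j2)
          else some (a, b, c, d)) := by
  cases acc with
  | none => rfl
  | some p => obtain ⟨a, b, c, d⟩ := p; rfl

lemma pvPR_shift (a b : Int) :
    PySem.List.pyRange (a + 1) (b + 1) 1 = (PySem.List.pyRange a b 1).map (fun x => x + 1) := by
  rw [PySem.List.pyRange_one, PySem.List.pyRange_one, List.map_map]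
  rw [show b + 1 - (a + 1) = b - a by ring]
  refine List.map_congr_left ?_
  intro k _
  simp [Function.comp]
  ring

lemma pvFlatMap_shift {γ : Type} (a b : Int) (f : Int → List γ) :
    (PySem.List.pyRange (a + 1) (b + 1) 1).flatMap f
      = (PySem.List.pyRange a b 1).flatMap (fun x => f (x + 1)) := by
  rw [pvPR_shift, List.flatMap_map]

lemma pvFlatMap_shift1 {γ : Type} (b : Int) (f : Int → List γ) :
    (PySem.List.pyRange 1 (b + 1) 1).flatMap f
      = (PySem.List.pyRange 0 b 1).flatMap (fun x => f (x + 1)) := by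
  have h := pvFlatMap_shift 0 b f
  norm_num at h
  exact h

lemma pvMap_shift {γ : Type} (a b : Int) (f : Int → γ) :
    (PySem.List.pyRange (a + 1) (b + 1) 1).map f
      = (PySem.List.pyRange a b 1).map (fun x => f (x + 1)) := by
  rw [pvPR_shift, List.map_map]
  rfl

lemma pvLA1 (n m : Int) :
    (PySem.List.pyRange 1 (n + 1) 1).flatMap (fun i1 =>
      (PySem.List.pyRange 1 (m + 1) 1).flatMap (fun j1 =>
        (PySem.List.pyRange i1 (n + 1) 1).flatMap (fun i2 =>
          (PySem.List.pyRange j1 (m + 1) 1).map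
            (fun j2 => ((i1, j1, i2, j2) : Int × Int × Int × Int)))))
    = (pvQuadsA n m).map pvShiftQ := by
  rw [pvFlatMap_shift1]
  unfold pvQuadsA
  rw [List.map_flatMap]
  refine congrArg (fun g => List.flatMap g (PySem.List.pyRange 0 n 1)) (funext fun i1 => ?_)
  rw [pvFlatMap_shift1, List.map_flatMap]
  refine congrArg (fun g => List.flatMap g (PySem.List.pyRange 0 m 1)) (funext fun j1 => ?_)
  rw [pvFlatMap_shift, List.map_flatMap]
  refine congrArg (fun g => List.flatMap g (PySem.List.pyRange i1 n 1)) (funext fun i2 => ?_)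
  rw [pvMap_shift, List.map_map]
  rfl

lemma pvFoldArea_none (l : List (Int × Int × Int × Int)) (hpw : l.Pairwise pvQLtP) :
    (l.map pvKey).foldl pvMinK none = (l.foldl pvAStep none).map pvKey := by
  have h := pvFoldArea_eq l none hpw (by intro p hp; cases hp)
  simpa using h.symm

lemma pvNested4 {σ : Type} (g : σ → (Int × Int × Int × Int) → σ) (A B C D : Int) (init : σ) :
    ((PySem.List.pyRange A B 1).flatMap (fun i1 =>
      (PySem.List.pyRange C D 1).flatMap (fun j1 =>
        (PySem.List.pyRange i1 B 1).flatMap (fun i2 =>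
          (PySem.List.pyRange j1 D 1).map (fun j2 => (i1, j1, i2, j2)))))).foldl g init
    = (PySem.List.pyRange A B 1).foldl (fun s i1 =>
        (PySem.List.pyRange C D 1).foldl (fun s j1 =>
          (PySem.List.pyRange i1 B 1).foldl (fun s i2 =>
            (PySem.List.pyRange j1 D 1).foldl (fun s j2 => g s (i1, j1, i2, j2)) s) s) s) init := by
  simp only [List.foldl_flatMap, List.foldl_map]

lemma pvA_fold (mx : List (List Int)) (tgt n m : Int) (ps : List (List Int))
    (hget : ∀ i' j' : Int, 0 ≤ i' → i' ≤ n → 0 ≤ j' → j' ≤ m →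
      pvGet2 ps i' j' = pvPS mx i' j') :
    (PySem.List.pyRange 1 (n + 1) 1).foldl (fun s i1 =>
        (PySem.List.pyRange 1 (m + 1) 1).foldl (fun s j1 =>
          (PySem.List.pyRange i1 (n + 1) 1).foldl (fun s i2 =>
            (PySem.List.pyRange j1 (m + 1) 1).foldl (fun s j2 =>
              pvGA mx tgt ps s (i1, j1, i2, j2)) s) s) s) none
    = ((pvQuadsA n m).filter (fun q => decide (pvR mx q = tgt))).foldl pvAStep none := by
  rw [← pvNested4 (pvGA mx tgt ps) 1 (n + 1) 1 (m + 1) none]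
  rw [pvLA1, List.foldl_map, List.foldl_filter]
  apply PySem.List.foldl_congr_mem
  intro acc q hq
  have hb := pvMem_quadsA hq
  obtain ⟨i1, j1, i2, j2⟩ := q
  have h1 : 0 ≤ i1 := hb.1
  have h2 : i1 ≤ i2 := hb.2.1
  have h3 : i2 < n := hb.2.2.1
  have h4 : 0 ≤ j1 := hb.2.2.2.1
  have h5 : j1 ≤ j2 := hb.2.2.2.2.1
  have h6 : j2 < m := hb.2.2.2.2.2
  rw [show pvShiftQ (i1, j1, i2, j2) = (i1 + 1, j1 + 1, i2 + 1, j2 + 1) from rfl, pvGA_mk]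
  simp only [add_sub_cancel_right]
  rw [hget (i2 + 1) (j2 + 1) (by omega) (by omega) (by omega) (by omega),
      hget (i2 + 1) j1 (by omega) (by omega) (by omega) (by omega),
      hget i1 (j2 + 1) (by omega) (by omega) (by omega) (by omega),
      hget i1 j1 (by omega) (by omega) (by omega) (by omega)]
  rw [pvPS_diff mx (p := i1) (q := i2 + 1) (u := j1) (v := j2 + 1)
      (by omega) (by omega) (by omega) (by omega)]
  rw [show ((PySem.List.pyRange i1 (i2 + 1) 1).map (fun r => pvRowS mx r j1 (j2 + 1))).sum
      = pvR mx (i1, j1, i2, j2) from rfl]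
  rw [show i2 + 1 - (i1 + 1) + 1 = i2 - i1 + 1 by ring,
      show j2 + 1 - (j1 + 1) + 1 = j2 - j1 + 1 by ring]
  simp only [decide_eq_true_eq]
  rw [pvAStep_mk]

lemma pvA_main (mx : List (List Int)) (tgt : Int) (hmx : mx ≠ []) :
    min_sub_matrix mx tgt
      = pvAnswer mx tgt
          (pvQuadsA (mx.length : Int) ((((PySem.List.pyGet? mx 0).getD []).length : Int))) := by
  have hn0 : ¬ ((mx.length : Int) = 0) := by
    simp only [Int.natCast_eq_zero]
    exact fun h => hmx (List.eq_nil_of_length_eq_zero h)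
  have hget : ∀ i' j' : Int, 0 ≤ i' → i' ≤ (mx.length : Int) → 0 ≤ j' →
      j' ≤ ((((PySem.List.pyGet? mx 0).getD []).length : Int)) →
      pvGet2 ((PySem.List.pyRange 1 ((mx.length : Int) + 1) 1).foldl
          (pvRowStep mx ((((PySem.List.pyGet? mx 0).getD []).length : Int)))
          (List.replicate ((mx.length : Int) + 1).toNat
            (List.replicate (((((PySem.List.pyGet? mx 0).getD []).length : Int)) + 1).toNat
              (0 : Int)))) i' j'
        = pvPS mx i' j' := by
    intro i' j' h1 h2 h3 h4
    exact pvTable_get mx _ _ (Int.natCast_nonneg _) (Int.natCast_nonneg _) h1 h2 h3 h4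
  simp only [min_sub_matrix]
  rw [if_neg hn0]
  symm
  unfold pvAnswer
  rw [pvFoldArea_none _ (List.Pairwise.sublist List.filter_sublist (pvPairwise_quadsA _ _))]
  rw [Option.map_map]
  rw [← pvA_fold mx tgt (mx.length : Int) ((((PySem.List.pyGet? mx 0).getD []).length : Int))
      _ hget]
  rfl

-- ---------- assembling port B ----------

lemma pvB_fold (mx : List (List Int)) (tgt n m : Int)
    (hrow : ∀ i : Int, 0 ≤ i → i < n → m.toNat ≤ ((PySem.List.pyGet? mx i).getD []).length) :
    (PySem.List.pyRange 0 n 1).foldl (fun best i1 =>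
        ((PySem.List.pyRange i1 n 1).foldl (pvStepI2 mx tgt m i1)
          (List.replicate m.toNat (0 : Int), best)).2) none
      = (((pvQuadsB n m).filter (fun q => decide (pvR mx q = tgt))).map pvKey).foldl
          pvMinK none := by
  unfold pvQuadsB
  rw [pvFilter_flatMap, List.map_flatMap, List.foldl_flatMap]
  apply PySem.List.foldl_congr_mem
  intro acc i1 hi1
  rw [PySem.List.mem_pyRange_one] at hi1
  have h := pvI2 mx tgt n m i1 hi1.1 hrow (n - i1).toNat i1 rfl le_rfl (by omega) acc
  rw [pvColArr_init] at h
  exact h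

lemma pvB_main (mx : List (List Int)) (tgt : Int) (hmx : mx ≠ [])
    (hrow : ∀ i : Int, 0 ≤ i → i < (mx.length : Int) →
      ((((PySem.List.pyGet? mx 0).getD []).length : Int)).toNat
        ≤ ((PySem.List.pyGet? mx i).getD []).length) :
    min_sub_matrix_alt mx tgt
      = pvAnswer mx tgt
          (pvQuadsB (mx.length : Int) ((((PySem.List.pyGet? mx 0).getD []).length : Int))) := by
  have hn0 : ¬ ((mx.length : Int) = 0) := by
    simp only [Int.natCast_eq_zero]
    exact fun h => hmx (List.eq_nil_of_length_eq_zero h)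
  simp only [min_sub_matrix_alt]
  rw [if_neg hn0]
  exact congrArg (Option.map pvOut)
    (pvB_fold mx tgt (mx.length : Int) ((((PySem.List.pyGet? mx 0).getD []).length : Int)) hrow)

-- ===== VERDICT (by name: the statement is the Claim_ definition above) =====
theorem min_sub_matrix_spec : Claim_unchanged_min_sub_matrix := by
  intro mx tgt hDom hPre hnd
  have hmx : mx ≠ [] := fun h => hnd (by simpa [D_min_sub_matrix] using h)
  have hrow : ∀ i : Int, 0 ≤ i → i < (mx.length : Int) →
      ((((PySem.List.pyGet? mx 0).getD []).length : Int)).toNat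
        ≤ ((PySem.List.pyGet? mx i).getD []).length := by
    intro i h1 h2
    rw [PySem.List.pyGet?_of_nonneg _ h1, List.getElem?_eq_getElem (by omega)]
    simp only [Option.getD_some, Int.toNat_natCast]
    exact hPre _ (List.getElem_mem _)
  rw [pvA_main mx tgt hmx, pvB_main mx tgt hmx hrow]
  unfold pvAnswer
  refine congrArg (Option.map pvOut) ?_
  exact (List.Perm.map pvKey (List.Perm.filter _ (pvQuads_perm _ _))).foldl_eq'
    (fun x _ y _ z => pvMinK_rightcomm z x y) none

theorem min_sub_matrix_changed : Claim_changed_min_sub_matrix := by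
  unfold Claim_changed_min_sub_matrix; decide

theorem min_sub_matrix_tight : Claim_exact_min_sub_matrix := by
  intro matrix target _ _ hD
  subst hD
  simp [min_sub_matrix, min_sub_matrix_alt]
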